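-- pv_equiv track=rewrite | github.com/ASPP/pelita | pelita/player/team.py | guess_initial_positions
-- ===== SOURCE A (Python) =====
-- def guess_initial_positions(walls):
--     """ Returns the free positions that are closest to the bottom left and
--     top right corner. The algorithm starts searching from (1, -2) and (-2, 1)
--     respectively and uses the manhattan distance for judging what is closest.
--     On equal distances, a smaller distance in the x value is preferred.
--     """
--     walls_width = max(walls)[0] + 1
--     walls_height = max(walls)[1] + 1
--
--     left_start = (1, walls_height - 2)
--     left_initials = []
--     right_start = (walls_width - 2, 1)
--     right_initials = []
--
--     dist = 0
--     while len(left_initials) < 2: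
--         # iterate through all possible x distances (inclusive)
--         for x_dist in range(dist + 1):
--             y_dist = dist - x_dist
--             pos = (left_start[0] + x_dist, left_start[1] - y_dist)
--             # if both coordinates are out of bounds, we stop
--             if not (0 <= pos[0] < walls_width) and not (0 <= pos[1] < walls_height):
--                 raise ValueError("Not enough free initial positions.")
--             # if one coordinate is out of bounds, we just continue
--             if not (0 <= pos[0] < walls_width) or not (0 <= pos[1] < walls_height):
--                 continue
--             # check if the new value is free
--             if not pos in walls:
--                 left_initials.append(pos)
--
--             if len(left_initials) == 2:
--                 break
--
--         dist += 1
--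
--     dist = 0
--     while len(right_initials) < 2:
--         # iterate through all possible x distances (inclusive)
--         for x_dist in range(dist + 1):
--             y_dist = dist - x_dist
--             pos = (right_start[0] - x_dist, right_start[1] + y_dist)
--             # if both coordinates are out of bounds, we stop
--             if not (0 <= pos[0] < walls_width) and not (0 <= pos[1] < walls_height):
--                 raise ValueError("Not enough free initial positions.")
--             # if one coordinate is out of bounds, we just continue
--             if not (0 <= pos[0] < walls_width) or not (0 <= pos[1] < walls_height):
--                 continue
--             # check if the new value is free
--             if not pos in walls:
--                 right_initials.append(pos)
--
--             if len(right_initials) == 2: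
--                 break
--
--         dist += 1
--
--     # lower indices start further away
--     left_initials.reverse()
--     right_initials.reverse()
--     return left_initials, right_initials
-- ===== SOURCE B (Python) =====
-- def guess_initial_positions(walls):
--     """ Returns the free positions that are closest to the bottom left and
--     top right corner: build the corner box of the quadrant that is provably
--     large enough to hold the two nearest free cells (len(set(walls)) + 2
--     diagonals), sort it by (manhattan distance, x offset), take the two best. """
--     width = max(walls)[0] + 1
--     height = max(walls)[1] + 1
--     wallset = set(walls)
--     reach = len(wallset) + 2   # a box this deep always contains >= 2 free cells
--                                # whenever the whole quadrant does
--
--     def two_nearest(corner, xs, ys):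
--         free = [(x, y) for x in xs for y in ys if (x, y) not in wallset]
--         free.sort(key=lambda p: (abs(p[0] - corner[0]) + abs(p[1] - corner[1]),
--                                  abs(p[0] - corner[0])))
--         if len(free) < 2:
--             raise ValueError("Not enough free initial positions.")
--         # lower indices start further away
--         return [free[1], free[0]]
--
--     left = two_nearest((1, height - 2),
--                        range(1, min(width, 2 + reach)),
--                        range(max(0, height - 2 - reach), height - 1))
--     right = two_nearest((width - 2, 1),
--                         range(max(0, width - 2 - reach), width - 1),
--                         range(1, min(height, 2 + reach)))
--     return left, right
-- ===== Notes on version B (the rewrite author's own statement) =====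
-- stated objective: alternative
-- what changed: Replaces A's imperative outward diagonal scan (nested while/for with break/continue/raise) by building, for each corner, a corner box of the quadrant that provably contains the two nearest free cells (len(set(walls))+2 diagonals deep), sorting it by (manhattan distance to the corner start, x offset) and taking the two best.
import Mathlib
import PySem

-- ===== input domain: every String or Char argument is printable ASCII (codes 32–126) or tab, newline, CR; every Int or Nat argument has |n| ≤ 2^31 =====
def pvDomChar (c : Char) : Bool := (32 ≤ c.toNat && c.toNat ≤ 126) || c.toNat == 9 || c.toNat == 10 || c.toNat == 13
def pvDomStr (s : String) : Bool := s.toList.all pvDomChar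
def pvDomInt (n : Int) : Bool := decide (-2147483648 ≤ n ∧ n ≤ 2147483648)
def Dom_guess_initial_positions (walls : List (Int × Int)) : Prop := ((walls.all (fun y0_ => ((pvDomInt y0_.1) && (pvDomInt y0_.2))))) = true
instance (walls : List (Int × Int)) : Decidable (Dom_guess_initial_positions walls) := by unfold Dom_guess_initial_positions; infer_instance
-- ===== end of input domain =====

-- B replaces A's imperative outward diagonal scan (nested while/for with break/continue/raise)
-- by building a provably sufficient corner box of the quadrant, sorting it by
-- (manhattan distance, x offset) and taking the two best (objective: alternative algorithm).

-- ===== PORT A =====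
-- the inner `for x_dist in range(dist + 1)` loop; `none` = the ValueError raise
def gipInner (walls : List (Int × Int)) (W H sx sy xsgn ysgn dist : Int) :
    List Int → List (Int × Int) → Option (List (Int × Int))
  | [], acc => some acc
  | xd :: rest, acc =>
    let pos : Int × Int := (sx + xsgn * xd, sy + ysgn * (dist - xd))
    if ¬(0 ≤ pos.1 ∧ pos.1 < W) ∧ ¬(0 ≤ pos.2 ∧ pos.2 < H) then
      none
    else if ¬(0 ≤ pos.1 ∧ pos.1 < W) ∨ ¬(0 ≤ pos.2 ∧ pos.2 < H) then
      gipInner walls W H sx sy xsgn ysgn dist rest acc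
    else
      let acc' := if pos ∈ walls then acc else acc ++ [pos]
      if acc'.length = 2 then some acc'
      else gipInner walls W H sx sy xsgn ysgn dist rest acc'

-- the outer `while len(initials) < 2` loop; fuel only guards termination (unreachable inside Pre_)
def gipWhile (walls : List (Int × Int)) (W H sx sy xsgn ysgn : Int) :
    Nat → Int → List (Int × Int) → Option (List (Int × Int))
  | fuel, dist, acc =>
    if acc.length < 2 then
      match fuel with
      | 0 => none
      | Nat.succ fuel' =>
        match gipInner walls W H sx sy xsgn ysgn dist (PySem.List.pyRange 0 (dist + 1)) acc with
        | none => none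
        | some acc' => gipWhile walls W H sx sy xsgn ysgn fuel' (dist + 1) acc'
    else some acc

def guess_initial_positions (walls : List (Int × Int)) : (List (Int × Int)) × (List (Int × Int)) :=
  let m := (PySem.List.max2? walls (fun p => p.1) (fun p => p.2)).getD (0, 0)  -- max(walls); raises on [], excluded by Pre_
  let W := m.1 + 1
  let H := m.2 + 1
  let fuel := (W + H).toNat + 4
  let lft := (gipWhile walls W H 1 (H - 2) 1 (-1) fuel 0 []).getD []
  let rgt := (gipWhile walls W H (W - 2) 1 (-1) 1 fuel 0 []).getD []
  (lft.reverse, rgt.reverse)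

-- ===== PORT B =====
-- [(x, y) for x in xs for y in ys if (x, y) not in wallset]
def gipQuadFree (blocked : List (Int × Int)) (xs ys : List Int) : List (Int × Int) :=
  xs.flatMap (fun x => ((ys.filter (fun y => decide ((x, y) ∉ blocked))).map (fun y => (x, y))))

-- sort key (manhattan distance to corner, x offset); Lex = Python's tuple order
def gipKey (corner : Int × Int) (p : Int × Int) : Lex (Int × Int) :=
  toLex (|p.1 - corner.1| + |p.2 - corner.2|, |p.1 - corner.1|)

def gipTwoNearest (blocked : List (Int × Int)) (corner : Int × Int) (xs ys : List Int) :
    List (Int × Int) :=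
  match PySem.List.sorted (gipQuadFree blocked xs ys) (gipKey corner) with
  | p0 :: p1 :: _ => [p1, p0]
  | _ => []          -- Python raises ValueError here; excluded by Pre_

def guess_initial_positions_alt (walls : List (Int × Int)) : (List (Int × Int)) × (List (Int × Int)) :=
  let m := (PySem.List.max2? walls (fun p => p.1) (fun p => p.2)).getD (0, 0)
  let W := m.1 + 1
  let H := m.2 + 1
  let ws := PySem.Set.ofList walls
  let reach : Int := (ws.length : Int) + 2
  let lft := gipTwoNearest ws (1, H - 2)
    (PySem.List.pyRange 1 (min W (2 + reach)))
    (PySem.List.pyRange (max 0 (H - 2 - reach)) (H - 1))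
  let rgt := gipTwoNearest ws (W - 2, 1)
    (PySem.List.pyRange (max 0 (W - 2 - reach)) (W - 1))
    (PySem.List.pyRange 1 (min H (2 + reach)))
  (lft, rgt)

-- ===== PRECONDITION & SPEC =====
-- number of distinct walls lying in the rectangle [x0,x1) × [y0,y1)
def pvRectWalls (walls : List (Int × Int)) (x0 x1 y0 y1 : Int) : Nat :=
  (walls.dedup.filter
    (fun p => decide (x0 ≤ p.1 ∧ p.1 < x1 ∧ y0 ≤ p.2 ∧ p.2 < y1))).length

-- number of free positions in the rectangle [x0,x1) × [y0,y1)
def pvFreeCount (walls : List (Int × Int)) (x0 x1 y0 y1 : Int) : Int :=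
  ((x1 - x0).toNat * (y1 - y0).toNat : Nat) - (pvRectWalls walls x0 x1 y0 y1 : Int)

-- Pre_ excludes exactly the inputs where the Python A raises ValueError: empty walls, or
-- fewer than two free cells in one of the two corner quadrants A scans.
def Pre_guess_initial_positions (walls : List (Int × Int)) : Prop :=
  let m := (PySem.List.max2? walls (fun p => p.1) (fun p => p.2)).getD (0, 0)
  let W := m.1 + 1
  let H := m.2 + 1
  walls ≠ [] ∧ 2 ≤ pvFreeCount walls 1 W 0 (H - 1) ∧ 2 ≤ pvFreeCount walls 0 (W - 1) 1 H
instance (walls : List (Int × Int)) : Decidable (Pre_guess_initial_positions walls) := by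
  unfold Pre_guess_initial_positions; infer_instance

def pvWitness_guess_initial_positions : (List (Int × Int)) := [(2, 2)]

def Spec_guess_initial_positions (walls : List (Int × Int)) (out : (List (Int × Int)) × (List (Int × Int))) : Prop := out = guess_initial_positions_alt walls
instance (walls : List (Int × Int)) (out : (List (Int × Int)) × (List (Int × Int))) : Decidable (Spec_guess_initial_positions walls out) := by unfold Spec_guess_initial_positions; infer_instance

-- ===== CLAIM (what is proved, stated in full; the proofs are below) =====
def Claim_equal_guess_initial_positions : Prop := ∀ (walls : List (Int × Int)), Dom_guess_initial_positions walls → Pre_guess_initial_positions walls → Spec_guess_initial_positions walls (guess_initial_positions walls)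

-- ===== LEMMAS AND PROOFS =====

def gipPos (sx sy xsgn ysgn d xd : Int) : Int × Int := (sx + xsgn * xd, sy + ysgn * (d - xd))
def gipDiag (walls : List (Int × Int)) (W H sx sy xsgn ysgn d : Int) (xds : List Int) :
    List (Int × Int) :=
  xds.filterMap (fun xd =>
    let p := gipPos sx sy xsgn ysgn d xd
    if (0 ≤ p.1 ∧ p.1 < W) ∧ (0 ≤ p.2 ∧ p.2 < H) ∧ p ∉ walls then some p else none)
def gipFlat (walls : List (Int × Int)) (W H sx sy xsgn ysgn : Int) (n d0 : Nat) :
    List (Int × Int) :=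
  (List.range' d0 (n - d0)).flatMap
    (fun (d : Nat) => gipDiag walls W H sx sy xsgn ysgn (d : Int) (PySem.List.pyRange 0 ((d : Int) + 1)))
def gipSafe (W H sx sy xsgn ysgn d xd : Int) : Prop :=
  (0 ≤ sx + xsgn * xd ∧ sx + xsgn * xd < W) ∨
  (0 ≤ sy + ysgn * (d - xd) ∧ sy + ysgn * (d - xd) < H)

lemma take_take_append {α : Type} (l r : List α) (k : Nat) :
    (l.take k ++ r).take k = (l ++ r).take k := by
  rw [List.take_append, List.take_append, List.take_take, List.length_take]
  have h1 : min k k = k := by omega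
  have h2 : k - min k l.length = k - l.length := by omega
  rw [h1, h2]

lemma gipInner_eq (walls : List (Int × Int)) (W H sx sy xsgn ysgn d : Int)
    (xds : List Int) (acc : List (Int × Int))
    (hsafe : ∀ xd ∈ xds, gipSafe W H sx sy xsgn ysgn d xd)
    (hlen : acc.length < 2) :
    gipInner walls W H sx sy xsgn ysgn d xds acc
      = some (acc ++ (gipDiag walls W H sx sy xsgn ysgn d xds).take (2 - acc.length)) := by
  induction xds generalizing acc with
  | nil => simp [gipInner, gipDiag]
  | cons xd rest ih =>
    have hsafe0 := hsafe xd (List.mem_cons_self ..)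
    have hsafer := fun z hz => hsafe z (List.mem_cons_of_mem _ hz)
    rw [gipInner, gipDiag, List.filterMap_cons]
    simp only [gipPos, gipSafe] at *
    by_cases hx : (0 ≤ sx + xsgn * xd ∧ sx + xsgn * xd < W)
    · by_cases hy : (0 ≤ sy + ysgn * (d - xd) ∧ sy + ysgn * (d - xd) < H)
      · -- in bounds
        rw [if_neg (by tauto), if_neg (by tauto)]
        by_cases hw : ((sx + xsgn * xd, sy + ysgn * (d - xd)) : Int × Int) ∈ walls
        · have hnone : (if (0 ≤ sx + xsgn * xd ∧ sx + xsgn * xd < W) ∧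
              (0 ≤ sy + ysgn * (d - xd) ∧ sy + ysgn * (d - xd) < H) ∧
              ((sx + xsgn * xd, sy + ysgn * (d - xd)) : Int × Int) ∉ walls
              then some ((sx + xsgn * xd, sy + ysgn * (d - xd)) : Int × Int) else none) = none :=
            if_neg (by tauto)
          rw [if_pos hw, if_neg (by omega), hnone, ih _ hsafer hlen]
          rfl
        · have hsome : (if (0 ≤ sx + xsgn * xd ∧ sx + xsgn * xd < W) ∧
              (0 ≤ sy + ysgn * (d - xd) ∧ sy + ysgn * (d - xd) < H) ∧
              ((sx + xsgn * xd, sy + ysgn * (d - xd)) : Int × Int) ∉ walls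
              then some ((sx + xsgn * xd, sy + ysgn * (d - xd)) : Int × Int) else none)
              = some (sx + xsgn * xd, sy + ysgn * (d - xd)) := if_pos ⟨hx, hy, hw⟩
          rw [if_neg hw, hsome]
          by_cases h2 : (acc ++ [((sx + xsgn * xd, sy + ysgn * (d - xd)) : Int × Int)]).length = 2
          · rw [if_pos h2]
            have hl1 : acc.length = 1 := by simpa using h2
            have : 2 - acc.length = 1 := by omega
            rw [this, List.take_succ_cons, List.take_zero]
          · rw [if_neg h2, ih (acc ++ [((sx + xsgn * xd, sy + ysgn * (d - xd)) : Int × Int)]) hsafer (by simp only [List.length_append, List.length_singleton] at h2 ⊢; omega)]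
            have : 2 - acc.length
                = (2 - (acc ++ [((sx + xsgn * xd, sy + ysgn * (d - xd)) : Int × Int)]).length) + 1 := by
              simp only [List.length_append, List.length_singleton] at h2 ⊢; omega
            rw [this, List.take_succ_cons, List.append_assoc]
            rfl
      · -- y out, x in: continue
        rw [if_neg (by tauto), if_pos (by tauto), if_neg (by tauto), ih acc hsafer hlen]
        rfl
    · -- x out; y must be in by hsafe0
      have hy : (0 ≤ sy + ysgn * (d - xd) ∧ sy + ysgn * (d - xd) < H) := by tauto
      rw [if_neg (by tauto), if_pos (by tauto), if_neg (by tauto), ih acc hsafer hlen]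
      rfl

lemma gipFlat_nil (walls : List (Int × Int)) (W H sx sy xsgn ysgn : Int) (n d0 : Nat)
    (h : n ≤ d0) : gipFlat walls W H sx sy xsgn ysgn n d0 = [] := by
  rw [gipFlat]
  have : n - d0 = 0 := by omega
  rw [this]
  rfl

lemma gipFlat_cons (walls : List (Int × Int)) (W H sx sy xsgn ysgn : Int) (n d0 : Nat)
    (h : d0 < n) :
    gipFlat walls W H sx sy xsgn ysgn n d0
      = gipDiag walls W H sx sy xsgn ysgn (d0 : Int) (PySem.List.pyRange 0 ((d0 : Int) + 1))
        ++ gipFlat walls W H sx sy xsgn ysgn n (d0 + 1) := by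
  rw [gipFlat, gipFlat]
  have : n - d0 = (n - (d0 + 1)) + 1 := by omega
  rw [this, List.range'_succ, List.flatMap_cons]

lemma take_two_mid {α : Type} (acc l r : List α) :
    (acc ++ (l.take (2 - acc.length) ++ r)).take 2 = (acc ++ (l ++ r)).take 2 := by
  rw [List.take_append (l₁ := acc) (l₂ := l.take (2 - acc.length) ++ r),
      List.take_append (l₁ := acc) (l₂ := l ++ r), take_take_append]

lemma gipWhile_eq (walls : List (Int × Int)) (W H sx sy xsgn ysgn : Int)
    (hsafe : ∀ d xd : Int, 0 ≤ d → d ≤ W + H - 3 → 0 ≤ xd → xd ≤ d →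
      gipSafe W H sx sy xsgn ysgn d xd)
    (fuel d0 : Nat) (acc : List (Int × Int))
    (hacc : acc.length ≤ 2)
    (htot : 2 ≤ (acc ++ gipFlat walls W H sx sy xsgn ysgn (W + H - 2).toNat d0).length)
    (hfuel : (W + H - 2).toNat - d0 ≤ fuel) :
    gipWhile walls W H sx sy xsgn ysgn fuel (d0 : Int) acc
      = some ((acc ++ gipFlat walls W H sx sy xsgn ysgn (W + H - 2).toNat d0).take 2) := by
  induction fuel generalizing d0 acc with
  | zero =>
    rw [gipWhile]
    have hl : ¬ acc.length < 2 := by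
      intro hl
      have hd0 : d0 < (W + H - 2).toNat := by
        by_contra hge
        rw [gipFlat_nil walls W H sx sy xsgn ysgn _ d0 (by omega), List.append_nil] at htot
        omega
      omega
    rw [if_neg hl]
    have h2 : (2 : Nat) = acc.length := by omega
    rw [List.take_append, h2, List.take_length, Nat.sub_self, List.take_zero, List.append_nil]
  | succ fuel' ih =>
    rw [gipWhile]
    by_cases hl : acc.length < 2
    · rw [if_pos hl]
      have hd0 : d0 < (W + H - 2).toNat := by
        by_contra hge
        rw [gipFlat_nil walls W H sx sy xsgn ysgn _ d0 (by omega), List.append_nil] at htot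
        omega
      have hsafe' : ∀ xd ∈ PySem.List.pyRange 0 ((d0 : Int) + 1),
          gipSafe W H sx sy xsgn ysgn (d0 : Int) xd := by
        intro xd hxm
        rw [PySem.List.mem_pyRange_one] at hxm
        exact hsafe _ xd (Int.natCast_nonneg _) (by omega) hxm.1 (by omega)
      rw [gipInner_eq walls W H sx sy xsgn ysgn (d0 : Int) _ acc hsafe' hl]
      rw [gipFlat_cons walls W H sx sy xsgn ysgn _ d0 hd0]
      show gipWhile walls W H sx sy xsgn ysgn fuel' (((d0 + 1 : Nat) : Int))
          (acc ++ (gipDiag walls W H sx sy xsgn ysgn (d0 : Int)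
            (PySem.List.pyRange 0 ((d0 : Int) + 1))).take (2 - acc.length))
        = some (List.take 2 (acc ++
            (gipDiag walls W H sx sy xsgn ysgn (d0 : Int) (PySem.List.pyRange 0 ((d0 : Int) + 1)) ++
              gipFlat walls W H sx sy xsgn ysgn (W + H - 2).toNat (d0 + 1))))
      rw [ih (d0 + 1)
        (acc ++ (gipDiag walls W H sx sy xsgn ysgn (d0 : Int)
          (PySem.List.pyRange 0 ((d0 : Int) + 1))).take (2 - acc.length))
        (by simp only [List.length_append, List.length_take]; omega)
        (by
          rw [gipFlat_cons walls W H sx sy xsgn ysgn _ d0 hd0] at htot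
          simp only [List.length_append, List.length_take] at htot ⊢
          omega)
        (by omega)]
      simp only [List.append_assoc]
      exact congrArg some (take_two_mid acc _ _)
    · rw [if_neg hl]
      have h2 : (2 : Nat) = acc.length := by omega
      rw [List.take_append, h2, List.take_length, Nat.sub_self, List.take_zero, List.append_nil]

lemma key_gipDiag (sx sy xsgn ysgn : Int)
    (hxsgn : xsgn = 1 ∨ xsgn = -1) (hysgn : ysgn = 1 ∨ ysgn = -1)
    (d xd : Int) (hxd : 0 ≤ xd) (hxdd : xd ≤ d) :
    gipKey (sx, sy) (gipPos sx sy xsgn ysgn d xd) = toLex (d, xd) := by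
  have h1 : |sx + xsgn * xd - sx| = xd := by
    rcases hxsgn with rfl | rfl
    · rw [one_mul]; rw [add_sub_cancel_left, abs_of_nonneg hxd]
    · rw [neg_one_mul, add_sub_cancel_left, abs_neg, abs_of_nonneg hxd]
  have h2 : |sy + ysgn * (d - xd) - sy| = d - xd := by
    rcases hysgn with rfl | rfl
    · rw [one_mul, add_sub_cancel_left, abs_of_nonneg (by omega)]
    · rw [neg_one_mul, add_sub_cancel_left, abs_neg, abs_of_nonneg (by omega)]
  simp only [gipKey, gipPos, h1, h2]
  congr 1
  exact Prod.ext (by omega) rfl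

lemma mem_gipDiag (walls : List (Int × Int)) (W H sx sy xsgn ysgn : Int) (xs ys : List Int)
    (hxsgn : xsgn = 1 ∨ xsgn = -1) (hysgn : ysgn = 1 ∨ ysgn = -1)
    (hxs : ∀ x : Int, x ∈ xs ↔ 0 ≤ x ∧ x < W ∧ 0 ≤ xsgn * (x - sx))
    (hys : ∀ y : Int, y ∈ ys ↔ 0 ≤ y ∧ y < H ∧ 0 ≤ ysgn * (y - sy))
    (d : Int) (_hd : 0 ≤ d) (p : Int × Int) :
    p ∈ gipDiag walls W H sx sy xsgn ysgn d (PySem.List.pyRange 0 (d + 1)) ↔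
      (p.1 ∈ xs ∧ p.2 ∈ ys ∧ p ∉ walls ∧ xsgn * (p.1 - sx) + ysgn * (p.2 - sy) = d) := by
  have exy : ∀ xd : Int, xsgn * ((sx + xsgn * xd) - sx) = xd := by
    intro xd; rcases hxsgn with rfl | rfl <;> ring
  have eyy : ∀ yd : Int, ysgn * ((sy + ysgn * yd) - sy) = yd := by
    intro yd; rcases hysgn with rfl | rfl <;> ring
  simp only [gipDiag, List.mem_filterMap, PySem.List.mem_pyRange_one, gipPos,
    Option.ite_none_right_eq_some, Option.some.injEq]
  constructor
  · rintro ⟨xd, ⟨h0, hlt⟩, ⟨hx, hy, hw⟩, rfl⟩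
    simp only at hx hy hw ⊢
    refine ⟨(hxs _).mpr ⟨hx.1, hx.2, by rw [exy]; omega⟩,
            (hys _).mpr ⟨hy.1, hy.2, by rw [eyy]; omega⟩, hw, by rw [exy, eyy]; omega⟩
  · rintro ⟨hx, hy, hw, hsum⟩
    obtain ⟨hx0, hxW, hxq⟩ := (hxs _).mp hx
    obtain ⟨hy0, hyH, hyq⟩ := (hys _).mp hy
    refine ⟨xsgn * (p.1 - sx), ⟨by omega, by omega⟩, ?_, ?_⟩
    · have e1 : sx + xsgn * (xsgn * (p.1 - sx)) = p.1 := by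
        rcases hxsgn with rfl | rfl <;> ring
      have e2 : sy + ysgn * (d - xsgn * (p.1 - sx)) = p.2 := by
        have : d - xsgn * (p.1 - sx) = ysgn * (p.2 - sy) := by omega
        rw [this]; rcases hysgn with rfl | rfl <;> ring
      rw [e1, e2]
      exact ⟨⟨hx0, hxW⟩, ⟨hy0, hyH⟩, hw⟩
    · have e1 : sx + xsgn * (xsgn * (p.1 - sx)) = p.1 := by
        rcases hxsgn with rfl | rfl <;> ring
      have e2 : sy + ysgn * (d - xsgn * (p.1 - sx)) = p.2 := by
        have : d - xsgn * (p.1 - sx) = ysgn * (p.2 - sy) := by omega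
        rw [this]; rcases hysgn with rfl | rfl <;> ring
      rw [e1, e2]


-- value produced by the filterMap inside gipDiag determines the key
lemma key_of_some (walls : List (Int × Int)) (W H sx sy xsgn ysgn : Int)
    (hxsgn : xsgn = 1 ∨ xsgn = -1) (hysgn : ysgn = 1 ∨ ysgn = -1)
    (d xd : Int) (hxd : 0 ≤ xd) (hxdd : xd ≤ d) (p : Int × Int)
    (h : (if (0 ≤ (gipPos sx sy xsgn ysgn d xd).1 ∧ (gipPos sx sy xsgn ysgn d xd).1 < W) ∧
            (0 ≤ (gipPos sx sy xsgn ysgn d xd).2 ∧ (gipPos sx sy xsgn ysgn d xd).2 < H) ∧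
            (gipPos sx sy xsgn ysgn d xd) ∉ walls
          then some (gipPos sx sy xsgn ysgn d xd) else none) = some p) :
    gipKey (sx, sy) p = toLex (d, xd) := by
  rw [Option.ite_none_right_eq_some, Option.some.injEq] at h
  rw [← h.2]
  exact key_gipDiag sx sy xsgn ysgn hxsgn hysgn d xd hxd hxdd

lemma pairwise_gipDiag (walls : List (Int × Int)) (W H sx sy xsgn ysgn : Int)
    (hxsgn : xsgn = 1 ∨ xsgn = -1) (hysgn : ysgn = 1 ∨ ysgn = -1) (d : Int) :
    (gipDiag walls W H sx sy xsgn ysgn d (PySem.List.pyRange 0 (d + 1))).Pairwise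
      (fun p q => gipKey (sx, sy) p < gipKey (sx, sy) q) := by
  rw [gipDiag, List.pairwise_filterMap]
  refine (PySem.List.pairwise_lt_pyRange_one 0 (d + 1)).imp_of_mem ?_
  intro xd xd' hm hm' hlt p hp p' hp'
  rw [PySem.List.mem_pyRange_one] at hm hm'
  rw [key_of_some walls W H sx sy xsgn ysgn hxsgn hysgn d xd (by omega) (by omega) p hp,
      key_of_some walls W H sx sy xsgn ysgn hxsgn hysgn d xd' (by omega) (by omega) p' hp']
  rw [Prod.Lex.toLex_lt_toLex]
  exact Or.inr ⟨rfl, hlt⟩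

lemma pairwise_gipFlat (walls : List (Int × Int)) (W H sx sy xsgn ysgn : Int) (n : Nat)
    (hxsgn : xsgn = 1 ∨ xsgn = -1) (hysgn : ysgn = 1 ∨ ysgn = -1) :
    (gipFlat walls W H sx sy xsgn ysgn n 0).Pairwise
      (fun p q => gipKey (sx, sy) p < gipKey (sx, sy) q) := by
  rw [gipFlat, List.pairwise_flatMap]
  constructor
  · intro d _; exact pairwise_gipDiag walls W H sx sy xsgn ysgn hxsgn hysgn d
  · refine (List.pairwise_lt_range' 1).imp_of_mem ?_
    intro d1 d2 _ _ hlt p hp q hq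
    rw [gipDiag, List.mem_filterMap] at hp hq
    obtain ⟨xd, hxm, hxs'⟩ := hp
    obtain ⟨xd', hxm', hxs''⟩ := hq
    rw [PySem.List.mem_pyRange_one] at hxm hxm'
    rw [key_of_some walls W H sx sy xsgn ysgn hxsgn hysgn _ xd (by omega) (by omega) p hxs',
        key_of_some walls W H sx sy xsgn ysgn hxsgn hysgn _ xd' (by omega) (by omega) q hxs'']
    rw [Prod.Lex.toLex_lt_toLex]
    exact Or.inl (by simp only []; exact_mod_cast hlt)

lemma mem_gipFlat (walls : List (Int × Int)) (W H sx sy xsgn ysgn : Int) (xs ys : List Int)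
    (hxsgn : xsgn = 1 ∨ xsgn = -1) (hysgn : ysgn = 1 ∨ ysgn = -1)
    (hxs : ∀ x : Int, x ∈ xs ↔ 0 ≤ x ∧ x < W ∧ 0 ≤ xsgn * (x - sx))
    (hys : ∀ y : Int, y ∈ ys ↔ 0 ≤ y ∧ y < H ∧ 0 ≤ ysgn * (y - sy))
    (hcover : ∀ x y : Int, x ∈ xs → y ∈ ys → xsgn * (x - sx) + ysgn * (y - sy) ≤ W + H - 4)
    (hWH : 4 ≤ W + H) (p : Int × Int) :
    p ∈ gipFlat walls W H sx sy xsgn ysgn (W + H - 2).toNat 0 ↔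
      (p.1 ∈ xs ∧ p.2 ∈ ys ∧ p ∉ walls) := by
  rw [gipFlat, List.mem_flatMap]
  constructor
  · rintro ⟨d, hdm, hp⟩
    have := (mem_gipDiag walls W H sx sy xsgn ysgn xs ys hxsgn hysgn hxs hys (d : Int)
      (Int.natCast_nonneg _) p).mp hp
    exact ⟨this.1, this.2.1, this.2.2.1⟩
  · rintro ⟨hx, hy, hw⟩
    have hq1 := (hxs _).mp hx
    have hq2 := (hys _).mp hy
    have hc := hcover p.1 p.2 hx hy
    refine ⟨(xsgn * (p.1 - sx) + ysgn * (p.2 - sy)).toNat, ?_, ?_⟩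
    · rw [List.mem_range'_1]; omega
    · refine (mem_gipDiag walls W H sx sy xsgn ysgn xs ys hxsgn hysgn hxs hys _
        (by positivity) p).mpr ⟨hx, hy, hw, by omega⟩

lemma mem_gipQuadFree (walls : List (Int × Int)) (xs ys : List Int) (p : Int × Int) :
    p ∈ gipQuadFree walls xs ys ↔ (p.1 ∈ xs ∧ p.2 ∈ ys ∧ p ∉ walls) := by
  obtain ⟨a, b⟩ := p
  simp [gipQuadFree, List.mem_flatMap, List.mem_filter, and_comm, and_left_comm]

lemma nodup_gipQuadFree (walls : List (Int × Int)) (xs ys : List Int)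
    (hnx : xs.Nodup) (hny : ys.Nodup) : (gipQuadFree walls xs ys).Nodup := by
  rw [gipQuadFree, List.nodup_flatMap]
  constructor
  · intro x _
    exact (hny.filter _).map (fun y y' h => congrArg Prod.snd h)
  · exact hnx.imp (fun {a b} hab => by
      intro p hp hq
      simp only [List.mem_map, List.mem_filter] at hp hq
      obtain ⟨y, _, rfl⟩ := hp
      obtain ⟨y', _, heq⟩ := hq
      exact hab (congrArg Prod.fst heq.symm))

lemma perm_gipFlat_quad (walls : List (Int × Int)) (W H sx sy xsgn ysgn : Int)
    (xs ys : List Int)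
    (hxsgn : xsgn = 1 ∨ xsgn = -1) (hysgn : ysgn = 1 ∨ ysgn = -1)
    (hxs : ∀ x : Int, x ∈ xs ↔ 0 ≤ x ∧ x < W ∧ 0 ≤ xsgn * (x - sx))
    (hys : ∀ y : Int, y ∈ ys ↔ 0 ≤ y ∧ y < H ∧ 0 ≤ ysgn * (y - sy))
    (hnx : xs.Nodup) (hny : ys.Nodup)
    (hcover : ∀ x y : Int, x ∈ xs → y ∈ ys → xsgn * (x - sx) + ysgn * (y - sy) ≤ W + H - 4)
    (hWH : 4 ≤ W + H) :
    (gipFlat walls W H sx sy xsgn ysgn (W + H - 2).toNat 0).Perm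
      (gipQuadFree walls xs ys) := by
  have hpw := pairwise_gipFlat walls W H sx sy xsgn ysgn (W + H - 2).toNat hxsgn hysgn
  have hnodupF : (gipFlat walls W H sx sy xsgn ysgn (W + H - 2).toNat 0).Nodup :=
    hpw.imp (fun {a b} hab he => absurd (he ▸ hab) (lt_irrefl _))
  rw [List.perm_ext_iff_of_nodup hnodupF (nodup_gipQuadFree walls xs ys hnx hny)]
  intro p
  rw [mem_gipFlat walls W H sx sy xsgn ysgn xs ys hxsgn hysgn hxs hys hcover hWH p,
      mem_gipQuadFree walls xs ys p]

-- membership in a cropped diagonal concatenation (any number n of diagonals)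
lemma mem_gipFlat' (walls : List (Int × Int)) (W H sx sy xsgn ysgn : Int) (xs ys : List Int)
    (hxsgn : xsgn = 1 ∨ xsgn = -1) (hysgn : ysgn = 1 ∨ ysgn = -1)
    (hxs : ∀ x : Int, x ∈ xs ↔ 0 ≤ x ∧ x < W ∧ 0 ≤ xsgn * (x - sx))
    (hys : ∀ y : Int, y ∈ ys ↔ 0 ≤ y ∧ y < H ∧ 0 ≤ ysgn * (y - sy))
    (n : Nat) (p : Int × Int) :
    p ∈ gipFlat walls W H sx sy xsgn ysgn n 0 ↔
      (p.1 ∈ xs ∧ p.2 ∈ ys ∧ p ∉ walls ∧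
        xsgn * (p.1 - sx) + ysgn * (p.2 - sy) < (n : Int)) := by
  rw [gipFlat, List.mem_flatMap]
  constructor
  · rintro ⟨d, hdm, hp⟩
    rw [List.mem_range'_1] at hdm
    have := (mem_gipDiag walls W H sx sy xsgn ysgn xs ys hxsgn hysgn hxs hys (d : Int)
      (Int.natCast_nonneg _) p).mp hp
    refine ⟨this.1, this.2.1, this.2.2.1, ?_⟩
    rw [this.2.2.2]
    exact_mod_cast (by omega : d < n)
  · rintro ⟨hx, hy, hw, hlt⟩
    have hq1 := (hxs _).mp hx
    have hq2 := (hys _).mp hy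
    refine ⟨(xsgn * (p.1 - sx) + ysgn * (p.2 - sy)).toNat, ?_, ?_⟩
    · rw [List.mem_range'_1]; omega
    · exact (mem_gipDiag walls W H sx sy xsgn ysgn xs ys hxsgn hysgn hxs hys _
        (Int.natCast_nonneg _) p).mpr ⟨hx, hy, hw, by omega⟩

-- two strictly key-sorted lists with the same members are equal
lemma eq_of_pairwise_lt_of_mem_iff {α κ : Type} [LinearOrder κ] (key : α → κ) :
    ∀ (l1 l2 : List α), l1.Pairwise (fun a b => key a < key b) →
      l2.Pairwise (fun a b => key a < key b) → (∀ x, x ∈ l1 ↔ x ∈ l2) → l1 = l2 := by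
  intro l1
  induction l1 with
  | nil =>
    intro l2 _ _ hm
    exact (List.eq_nil_iff_forall_not_mem.mpr (fun x hx => List.not_mem_nil ((hm x).mpr hx))).symm
  | cons a t ih =>
    intro l2 h1 h2 hm
    cases l2 with
    | nil => exact absurd ((hm a).mp (List.mem_cons_self ..)) (List.not_mem_nil)
    | cons b t2 =>
      have hab : a = b := by
        by_contra hne
        have ha2 : a ∈ t2 := by
          rcases List.mem_cons.mp ((hm a).mp (List.mem_cons_self ..)) with h | h
          · exact absurd h hne
          · exact h
        have hb1 : b ∈ t := by
          rcases List.mem_cons.mp ((hm b).mpr (List.mem_cons_self ..)) with h | h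
          · exact absurd h.symm hne
          · exact h
        exact absurd ((List.pairwise_cons.mp h1).1 b hb1)
          (not_lt_of_gt ((List.pairwise_cons.mp h2).1 a ha2))
      subst hab
      have hm' : ∀ x, x ∈ t ↔ x ∈ t2 := by
        intro x
        constructor
        · intro hx
          rcases List.mem_cons.mp ((hm x).mp (List.mem_cons_of_mem _ hx)) with h | h
          · exact absurd (h ▸ (List.pairwise_cons.mp h1).1 x hx) (lt_irrefl _)
          · exact h
        · intro hx
          rcases List.mem_cons.mp ((hm x).mpr (List.mem_cons_of_mem _ hx)) with h | h
          · exact absurd (h ▸ (List.pairwise_cons.mp h2).1 x hx) (lt_irrefl _)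
          · exact h
      rw [ih t2 (List.pairwise_cons.mp h1).2 (List.pairwise_cons.mp h2).2 hm']

-- a filter by a key-downward-closed predicate is a prefix of a key-sorted list
lemma filter_downclosed_prefix {α κ : Type} [LinearOrder κ] (key : α → κ) (q : α → Bool)
    (hq : ∀ a b : α, key a ≤ key b → q b = true → q a = true) :
    ∀ l : List α, l.Pairwise (fun a b => key a ≤ key b) → ∃ r, l = l.filter q ++ r := by
  intro l
  induction l with
  | nil => exact fun _ => ⟨[], rfl⟩
  | cons a t ih =>
    intro hp
    by_cases hqa : q a = true
    · obtain ⟨r, hr⟩ := ih (List.pairwise_cons.mp hp).2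
      exact ⟨r, by rw [List.filter_cons_of_pos hqa, List.cons_append, ← hr]⟩
    · have ht : t.filter q = [] := by
        rw [List.filter_eq_nil_iff]
        intro x hx hqx
        exact hqa (hq a x ((List.pairwise_cons.mp hp).1 x hx) hqx)
      exact ⟨a :: t, by rw [List.filter_cons_of_neg (by simpa using hqa), ht]; rfl⟩

lemma take_two_of_prefix {α : Type} (P r : List α) (h2 : 2 ≤ P.length) :
    (P ++ r).take 2 = P.take 2 :=
  List.take_append_of_le_length h2

lemma gipFlat_append (walls : List (Int × Int)) (W H sx sy xsgn ysgn : Int) (n1 n2 : Nat)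
    (h : n1 ≤ n2) :
    gipFlat walls W H sx sy xsgn ysgn n2 0
      = gipFlat walls W H sx sy xsgn ysgn n1 0 ++ gipFlat walls W H sx sy xsgn ysgn n2 n1 := by
  rw [gipFlat, gipFlat, gipFlat, ← List.flatMap_append]
  congr 1
  have := List.range'_append (s := 0) (m := n1) (n := n2 - n1) (step := 1)
  simp only [Nat.zero_add, Nat.one_mul] at this
  rw [Nat.sub_zero, Nat.sub_zero, this]
  congr 1
  omega

-- the walls-blocked diagonal is the wall-free filter of the unblocked diagonal
lemma gipDiag_filter (walls : List (Int × Int)) (W H sx sy xsgn ysgn d : Int) (xds : List Int) :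
    gipDiag walls W H sx sy xsgn ysgn d xds
      = (gipDiag [] W H sx sy xsgn ysgn d xds).filter (fun p => decide (p ∉ walls)) := by
  induction xds with
  | nil => rfl
  | cons xd rest ih =>
    rw [gipDiag, gipDiag, List.filterMap_cons, List.filterMap_cons]
    set c := gipPos sx sy xsgn ysgn d xd with hc
    by_cases hb : (0 ≤ c.1 ∧ c.1 < W) ∧ (0 ≤ c.2 ∧ c.2 < H)
    · by_cases hw : c ∈ walls
      · have hA : (if (0 ≤ c.1 ∧ c.1 < W) ∧ (0 ≤ c.2 ∧ c.2 < H) ∧ c ∉ walls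
            then some c else none) = none := if_neg (by tauto)
        have hB : (if (0 ≤ c.1 ∧ c.1 < W) ∧ (0 ≤ c.2 ∧ c.2 < H) ∧ c ∉ ([] : List (Int × Int))
            then some c else none) = some c := if_pos ⟨hb.1, hb.2, List.not_mem_nil⟩
        rw [hA, hB, List.filter_cons_of_neg (by simpa using hw)]
        exact ih
      · have hA : (if (0 ≤ c.1 ∧ c.1 < W) ∧ (0 ≤ c.2 ∧ c.2 < H) ∧ c ∉ walls
            then some c else none) = some c := if_pos ⟨hb.1, hb.2, hw⟩
        have hB : (if (0 ≤ c.1 ∧ c.1 < W) ∧ (0 ≤ c.2 ∧ c.2 < H) ∧ c ∉ ([] : List (Int × Int))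
            then some c else none) = some c := if_pos ⟨hb.1, hb.2, List.not_mem_nil⟩
        rw [hA, hB, List.filter_cons_of_pos (by simpa using hw)]
        exact congrArg (c :: ·) ih
    · have hA : (if (0 ≤ c.1 ∧ c.1 < W) ∧ (0 ≤ c.2 ∧ c.2 < H) ∧ c ∉ walls
          then some c else none) = none := if_neg (by tauto)
      have hB : (if (0 ≤ c.1 ∧ c.1 < W) ∧ (0 ≤ c.2 ∧ c.2 < H) ∧ c ∉ ([] : List (Int × Int))
          then some c else none) = none := if_neg (by tauto)
      rw [hA, hB]
      exact ih

lemma gipFlat_filter (walls : List (Int × Int)) (W H sx sy xsgn ysgn : Int) (n d0 : Nat) :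
    gipFlat walls W H sx sy xsgn ysgn n d0
      = (gipFlat [] W H sx sy xsgn ysgn n d0).filter (fun p => decide (p ∉ walls)) := by
  rw [gipFlat, gipFlat, List.filter_flatMap]
  congr 1
  funext d
  exact gipDiag_filter walls W H sx sy xsgn ysgn _ _

-- every diagonal d ≤ W + H - 4 contains an in-bounds position
lemma gipDiag_nonempty (W H sx sy xsgn ysgn : Int) (xs ys : List Int)
    (hxsgn : xsgn = 1 ∨ xsgn = -1) (hysgn : ysgn = 1 ∨ ysgn = -1)
    (hxs : ∀ x : Int, x ∈ xs ↔ 0 ≤ x ∧ x < W ∧ 0 ≤ xsgn * (x - sx))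
    (hys : ∀ y : Int, y ∈ ys ↔ 0 ≤ y ∧ y < H ∧ 0 ≤ ysgn * (y - sy))
    (hxq : ∀ t : Int, 0 ≤ t → t ≤ W - 2 → (sx + xsgn * t) ∈ xs)
    (hyq : ∀ t : Int, 0 ≤ t → t ≤ H - 2 → (sy + ysgn * t) ∈ ys)
    (hW : 2 ≤ W) (hH : 2 ≤ H)
    (d : Int) (hd0 : 0 ≤ d) (hdmax : d ≤ W + H - 4) :
    gipDiag ([] : List (Int × Int)) W H sx sy xsgn ysgn d (PySem.List.pyRange 0 (d + 1)) ≠ [] := by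
  intro hnil
  have hmem := (mem_gipDiag [] W H sx sy xsgn ysgn xs ys hxsgn hysgn hxs hys d hd0
    (gipPos sx sy xsgn ysgn d (min d (W - 2)))).mpr ?_
  · rw [hnil] at hmem; exact List.not_mem_nil hmem
  · have exy : xsgn * ((sx + xsgn * (min d (W - 2))) - sx) = min d (W - 2) := by
      rcases hxsgn with rfl | rfl <;> ring
    have eyy : ysgn * ((sy + ysgn * (d - min d (W - 2))) - sy) = d - min d (W - 2) := by
      rcases hysgn with rfl | rfl <;> ring
    refine ⟨?_, ?_, List.not_mem_nil, ?_⟩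
    · exact hxq (min d (W - 2)) (by omega) (by omega)
    · exact hyq (d - min d (W - 2)) (by omega) (by omega)
    · rw [gipPos]
      simp only
      rw [exy, eyy]
      omega

-- diagonals beyond W + H - 4 are empty
lemma gipDiag_empty (walls : List (Int × Int)) (W H sx sy xsgn ysgn : Int) (xs ys : List Int)
    (hxsgn : xsgn = 1 ∨ xsgn = -1) (hysgn : ysgn = 1 ∨ ysgn = -1)
    (hxs : ∀ x : Int, x ∈ xs ↔ 0 ≤ x ∧ x < W ∧ 0 ≤ xsgn * (x - sx))
    (hys : ∀ y : Int, y ∈ ys ↔ 0 ≤ y ∧ y < H ∧ 0 ≤ ysgn * (y - sy))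
    (hcover : ∀ x y : Int, x ∈ xs → y ∈ ys → xsgn * (x - sx) + ysgn * (y - sy) ≤ W + H - 4)
    (d : Int) (hd0 : 0 ≤ d) (hbig : W + H - 4 < d) :
    gipDiag walls W H sx sy xsgn ysgn d (PySem.List.pyRange 0 (d + 1)) = [] := by
  rw [List.eq_nil_iff_forall_not_mem]
  intro p hp
  have := (mem_gipDiag walls W H sx sy xsgn ysgn xs ys hxsgn hysgn hxs hys d hd0 p).mp hp
  have := hcover p.1 p.2 this.1 this.2.1
  omega

lemma gipFlat_tail_nil (walls : List (Int × Int)) (W H sx sy xsgn ysgn : Int) (xs ys : List Int)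
    (hxsgn : xsgn = 1 ∨ xsgn = -1) (hysgn : ysgn = 1 ∨ ysgn = -1)
    (hxs : ∀ x : Int, x ∈ xs ↔ 0 ≤ x ∧ x < W ∧ 0 ≤ xsgn * (x - sx))
    (hys : ∀ y : Int, y ∈ ys ↔ 0 ≤ y ∧ y < H ∧ 0 ≤ ysgn * (y - sy))
    (hcover : ∀ x y : Int, x ∈ xs → y ∈ ys → xsgn * (x - sx) + ysgn * (y - sy) ≤ W + H - 4)
    (n d0 : Nat) (hd0 : W + H - 4 < (d0 : Int)) :
    gipFlat walls W H sx sy xsgn ysgn n d0 = [] := by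
  rw [gipFlat, List.flatMap_eq_nil_iff]
  intro d hd
  rw [List.mem_range'_1] at hd
  exact gipDiag_empty walls W H sx sy xsgn ysgn xs ys hxsgn hysgn hxs hys hcover _
    (Int.natCast_nonneg _) (by exact_mod_cast lt_of_lt_of_le hd0 (by exact_mod_cast hd.1))

lemma flatMap_len_ge {α : Type} (f : Nat → List α) :
    ∀ l : List Nat, (∀ d ∈ l, f d ≠ []) → l.length ≤ (l.flatMap f).length := by
  intro l
  induction l with
  | nil => intro; simp
  | cons d t ih =>
    intro h
    rw [List.flatMap_cons, List.length_append, List.length_cons]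
    have h1 : 1 ≤ (f d).length := by
      have := h d (List.mem_cons_self ..)
      cases hfd : f d with
      | nil => exact absurd hfd this
      | cons _ _ => simp
    have := ih (fun x hx => h x (List.mem_cons_of_mem _ hx))
    omega

-- key of a quadrant position, written with signs
lemma key_quad (sx sy xsgn ysgn : Int)
    (hxsgn : xsgn = 1 ∨ xsgn = -1) (hysgn : ysgn = 1 ∨ ysgn = -1)
    (p : Int × Int) (hx0 : 0 ≤ xsgn * (p.1 - sx)) (hy0 : 0 ≤ ysgn * (p.2 - sy)) :
    gipKey (sx, sy) p
      = toLex (xsgn * (p.1 - sx) + ysgn * (p.2 - sy), xsgn * (p.1 - sx)) := by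
  have h1 : |p.1 - sx| = xsgn * (p.1 - sx) := by
    rcases hxsgn with rfl | rfl
    · rw [one_mul] at *; exact abs_of_nonneg hx0
    · rw [neg_one_mul] at *; rw [abs_of_nonpos (by omega)]
  have h2 : |p.2 - sy| = ysgn * (p.2 - sy) := by
    rcases hysgn with rfl | rfl
    · rw [one_mul] at *; exact abs_of_nonneg hy0
    · rw [neg_one_mul] at *; rw [abs_of_nonpos (by omega)]
  rw [gipKey]
  simp only
  rw [h1, h2]

-- the key is injective on the quadrant
lemma key_inj_quad (sx sy xsgn ysgn : Int)
    (hxsgn : xsgn = 1 ∨ xsgn = -1) (hysgn : ysgn = 1 ∨ ysgn = -1)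
    (p q : Int × Int)
    (hpx : 0 ≤ xsgn * (p.1 - sx)) (hpy : 0 ≤ ysgn * (p.2 - sy))
    (hqx : 0 ≤ xsgn * (q.1 - sx)) (hqy : 0 ≤ ysgn * (q.2 - sy))
    (hk : gipKey (sx, sy) p = gipKey (sx, sy) q) : p = q := by
  rw [key_quad sx sy xsgn ysgn hxsgn hysgn p hpx hpy,
      key_quad sx sy xsgn ysgn hxsgn hysgn q hqx hqy] at hk
  have := toLex.injective hk
  have h1 : xsgn * (p.1 - sx) + ysgn * (p.2 - sy) = xsgn * (q.1 - sx) + ysgn * (q.2 - sy) :=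
    congrArg Prod.fst this
  have h2 : xsgn * (p.1 - sx) = xsgn * (q.1 - sx) := congrArg Prod.snd this
  refine Prod.ext ?_ ?_
  · rcases hxsgn with rfl | rfl <;> omega
  · rcases hxsgn with rfl | rfl <;> rcases hysgn with rfl | rfl <;> omega

lemma gipQuadFree_nil (xs ys : List Int) :
    gipQuadFree [] xs ys = xs.flatMap (fun x => ys.map (fun y => (x, y))) := by
  simp [gipQuadFree]

lemma gipQuadFree_eq_filter (blocked : List (Int × Int)) (xs ys : List Int) :
    gipQuadFree blocked xs ys
      = ((xs.flatMap (fun x => ys.map (fun y => ((x, y) : Int × Int)))).filter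
          (fun p => decide (p ∉ blocked))) := by
  rw [gipQuadFree, List.filter_flatMap]
  congr 1
  funext x
  rw [List.filter_map]
  rfl

-- the arithmetic rectangle count bounds the free-cell list from below
lemma quad_count (walls : List (Int × Int)) (x0 x1 y0 y1 : Int)
    (h : 2 ≤ pvFreeCount walls x0 x1 y0 y1) :
    2 ≤ (gipQuadFree walls (PySem.List.pyRange x0 x1) (PySem.List.pyRange y0 y1)).length := by
  rw [gipQuadFree_eq_filter]
  have hsum := List.length_eq_length_filter_add
    (l := (PySem.List.pyRange x0 x1).flatMap
      (fun x => (PySem.List.pyRange y0 y1).map (fun y => ((x, y) : Int × Int))))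
    (fun p => decide (p ∉ walls))
  have hPlen : ((PySem.List.pyRange x0 x1).flatMap
      (fun x => (PySem.List.pyRange y0 y1).map (fun y => ((x, y) : Int × Int)))).length
      = (x1 - x0).toNat * (y1 - y0).toNat := by
    simp [List.length_flatMap, PySem.List.length_pyRange_one, List.map_const',
      List.sum_replicate, smul_eq_mul]
  have hG : (((PySem.List.pyRange x0 x1).flatMap
      (fun x => (PySem.List.pyRange y0 y1).map (fun y => ((x, y) : Int × Int)))).filter
        (fun p => !decide (p ∉ walls))).length ≤ pvRectWalls walls x0 x1 y0 y1 := by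
    apply List.Subperm.length_le
    apply List.subperm_of_subset
    · apply List.Nodup.filter
      have := nodup_gipQuadFree [] (PySem.List.pyRange x0 x1) (PySem.List.pyRange y0 y1)
        (PySem.List.nodup_pyRange_one _ _) (PySem.List.nodup_pyRange_one _ _)
      rwa [gipQuadFree_nil] at this
    · intro p hp
      rw [List.mem_filter] at hp
      have hpw : p ∈ walls := by simpa using hp.2
      have hpm : p ∈ gipQuadFree [] (PySem.List.pyRange x0 x1) (PySem.List.pyRange y0 y1) := by
        rw [gipQuadFree_nil]; exact hp.1
      rw [mem_gipQuadFree] at hpm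
      rw [PySem.List.mem_pyRange_one] at hpm
      have hy := hpm.2.1
      rw [PySem.List.mem_pyRange_one] at hy
      show p ∈ walls.dedup.filter
        (fun p => decide (x0 ≤ p.1 ∧ p.1 < x1 ∧ y0 ≤ p.2 ∧ p.2 < y1))
      rw [List.mem_filter]
      exact ⟨List.mem_dedup.mpr hpw, by simp; omega⟩
  rw [pvFreeCount] at h
  omega

lemma two_le_of_count (walls : List (Int × Int)) (W H : Int)
    (h : 2 ≤ pvFreeCount walls 1 W 0 (H - 1)) : 2 ≤ W ∧ 2 ≤ H := by
  rw [pvFreeCount] at h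
  have h2 : 2 ≤ (W - 1).toNat * (H - 1 - 0).toNat := by omega
  have ha : 1 ≤ (W - 1).toNat := by
    by_contra hc
    push Not at hc
    interval_cases h' : (W - 1).toNat
    simp at h2
  have hb : 1 ≤ (H - 1 - 0).toNat := by
    by_contra hc
    push Not at hc
    interval_cases h' : (H - 1 - 0).toNat
    simp at h2
  omega

-- lexicographic ≤ implies ≤ on the first component
lemma lex_fst_le (u v : Lex (Int × Int)) (h : u ≤ v) : (ofLex u).1 ≤ (ofLex v).1 := by
  have := (Prod.Lex.toLex_le_toLex (x := ofLex u) (y := ofLex v)).mp (by simpa using h)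
  rcases this with h' | h'
  · exact le_of_lt h'
  · exact le_of_eq h'.1

lemma gipCorner_eq (walls ws : List (Int × Int)) (W H sx sy xsgn ysgn r : Int)
    (xs ys xs' ys' : List Int)
    (hW : 2 ≤ W) (hH : 2 ≤ H)
    (hxsgn : xsgn = 1 ∨ xsgn = -1) (hysgn : ysgn = 1 ∨ ysgn = -1)
    (hws : ∀ p : Int × Int, p ∈ ws ↔ p ∈ walls)
    (hr : (walls.dedup.length : Int) + 2 ≤ r)
    (hxs : ∀ x : Int, x ∈ xs ↔ 0 ≤ x ∧ x < W ∧ 0 ≤ xsgn * (x - sx))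
    (hys : ∀ y : Int, y ∈ ys ↔ 0 ≤ y ∧ y < H ∧ 0 ≤ ysgn * (y - sy))
    (hnx : xs.Nodup) (hny : ys.Nodup)
    (hsafe : ∀ d xd : Int, 0 ≤ d → d ≤ W + H - 3 → 0 ≤ xd → xd ≤ d →
      gipSafe W H sx sy xsgn ysgn d xd)
    (hcover : ∀ x y : Int, x ∈ xs → y ∈ ys → xsgn * (x - sx) + ysgn * (y - sy) ≤ W + H - 4)
    (hxq : ∀ t : Int, 0 ≤ t → t ≤ W - 2 → (sx + xsgn * t) ∈ xs)
    (hyq : ∀ t : Int, 0 ≤ t → t ≤ H - 2 → (sy + ysgn * t) ∈ ys)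
    (hxs' : ∀ x : Int, x ∈ xs' ↔ (x ∈ xs ∧ xsgn * (x - sx) ≤ r))
    (hys' : ∀ y : Int, y ∈ ys' ↔ (y ∈ ys ∧ ysgn * (y - sy) ≤ r))
    (hnx' : xs'.Nodup) (hny' : ys'.Nodup)
    (hquad : 2 ≤ (gipQuadFree walls xs ys).length) :
    ((gipWhile walls W H sx sy xsgn ysgn ((W + H).toNat + 4) 0 []).getD []).reverse
      = gipTwoNearest ws (sx, sy) xs' ys' := by
  have hWH : 4 ≤ W + H := by omega
  have hk0 : (0 : Int) ≤ (walls.dedup.length : Int) := Int.natCast_nonneg _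
  have hMle1 : min r (W + H - 4) ≤ r := min_le_left _ _
  have hMle2 : min r (W + H - 4) ≤ W + H - 4 := min_le_right _ _
  have hMcases := min_choice r (W + H - 4)
  have hM0 : 0 ≤ min r (W + H - 4) := by rcases hMcases with h | h <;> omega
  have hM'cast : ((min r (W + H - 4)).toNat : Int) = min r (W + H - 4) :=
    Int.toNat_of_nonneg hM0
  have hMN : (min r (W + H - 4)).toNat + 1 ≤ (W + H - 2).toNat := by omega
  -- the first min+1 diagonals hold at least two free cells
  have hcnt2 : 2 ≤ (gipFlat walls W H sx sy xsgn ysgn ((min r (W + H - 4)).toNat + 1) 0).length := by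
    rcases hMcases with hmin | hmin
    · -- min = r: count cells diagonal by diagonal against the distinct walls
      have hAll : (min r (W + H - 4)).toNat + 1
          ≤ (gipFlat [] W H sx sy xsgn ysgn ((min r (W + H - 4)).toNat + 1) 0).length := by
        rw [gipFlat]
        have hlen := flatMap_len_ge
          (fun (d : Nat) => gipDiag [] W H sx sy xsgn ysgn (d : Int)
            (PySem.List.pyRange 0 ((d : Int) + 1)))
          (List.range' 0 (((min r (W + H - 4)).toNat + 1) - 0))
          (fun d hd => by
            rw [List.mem_range'_1] at hd
            exact gipDiag_nonempty W H sx sy xsgn ysgn xs ys hxsgn hysgn hxs hys hxq hyq hW hH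
              (d : Int) (Int.natCast_nonneg _) (by omega))
        rwa [List.length_range'] at hlen
      have hfilter := gipFlat_filter walls W H sx sy xsgn ysgn ((min r (W + H - 4)).toNat + 1) 0
      have hsum := List.length_eq_length_filter_add
        (l := gipFlat [] W H sx sy xsgn ysgn ((min r (W + H - 4)).toNat + 1) 0)
        (fun p => decide (p ∉ walls))
      have hG : ((gipFlat [] W H sx sy xsgn ysgn ((min r (W + H - 4)).toNat + 1) 0).filter
          (fun p => !decide (p ∉ walls))).length ≤ walls.dedup.length := by
        apply List.Subperm.length_le
        apply List.subperm_of_subset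
        · apply List.Nodup.filter
          exact (pairwise_gipFlat [] W H sx sy xsgn ysgn _ hxsgn hysgn).imp
            (fun {a b} hab he => absurd (he ▸ hab) (lt_irrefl _))
        · intro p hp
          rw [List.mem_filter] at hp
          exact List.mem_dedup.mpr (by simpa using hp.2)
      rw [hfilter]
      omega
    · -- min = W + H - 4: the crop is the whole quadrant
      have hsplit := gipFlat_append walls W H sx sy xsgn ysgn
        ((min r (W + H - 4)).toNat + 1) ((W + H - 2).toNat) hMN
      have htail : gipFlat walls W H sx sy xsgn ysgn ((W + H - 2).toNat)
          ((min r (W + H - 4)).toNat + 1) = [] :=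
        gipFlat_tail_nil walls W H sx sy xsgn ysgn xs ys hxsgn hysgn hxs hys hcover _ _
          (by push_cast; omega)
      have hperm := perm_gipFlat_quad walls W H sx sy xsgn ysgn xs ys hxsgn hysgn hxs hys
        hnx hny hcover hWH
      have hlen := hperm.length_eq
      rw [hsplit, htail, List.append_nil] at hlen
      omega
  -- the A loop collects the first two cells of the diagonal order
  have hwhile : gipWhile walls W H sx sy xsgn ysgn ((W + H).toNat + 4) 0 []
      = some ((gipFlat walls W H sx sy xsgn ysgn ((min r (W + H - 4)).toNat + 1) 0).take 2) := by
    have hsplitN := gipFlat_append walls W H sx sy xsgn ysgn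
      ((min r (W + H - 4)).toNat + 1) ((W + H - 2).toNat) hMN
    have hw := gipWhile_eq walls W H sx sy xsgn ysgn hsafe ((W + H).toNat + 4) 0 []
      (by simp)
      (by rw [List.nil_append, hsplitN, List.length_append]; omega)
      (by omega)
    rw [show (((0 : Nat)) : Int) = (0 : Int) by simp] at hw
    rw [hw, List.nil_append, hsplitN, take_two_of_prefix _ _ hcnt2]
  -- the sorted box is the cropped diagonal order followed by junk
  have hbox : ∃ rest, PySem.List.sorted (gipQuadFree ws xs' ys') (gipKey (sx, sy))
      = gipFlat walls W H sx sy xsgn ysgn ((min r (W + H - 4)).toNat + 1) 0 ++ rest := by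
    have hSle := PySem.List.sorted_pairwise (gipQuadFree ws xs' ys') (gipKey (sx, sy))
    have hSperm := PySem.List.sorted_perm (gipQuadFree ws xs' ys') (gipKey (sx, sy)) false
    have hSnodup : (PySem.List.sorted (gipQuadFree ws xs' ys') (gipKey (sx, sy))).Nodup :=
      hSperm.nodup_iff.mpr (nodup_gipQuadFree ws xs' ys' hnx' hny')
    have hmemS : ∀ p ∈ PySem.List.sorted (gipQuadFree ws xs' ys') (gipKey (sx, sy)),
        p.1 ∈ xs ∧ p.2 ∈ ys ∧ xsgn * (p.1 - sx) ≤ r ∧ ysgn * (p.2 - sy) ≤ r ∧ p ∉ walls := by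
      intro p hp
      rw [PySem.List.mem_sorted, mem_gipQuadFree] at hp
      obtain ⟨hx', hy', hwn⟩ := hp
      obtain ⟨hxx, hxr⟩ := (hxs' _).mp hx'
      obtain ⟨hyy, hyr⟩ := (hys' _).mp hy'
      exact ⟨hxx, hyy, hxr, hyr, fun hw => hwn ((hws p).mpr hw)⟩
    have hSlt : (PySem.List.sorted (gipQuadFree ws xs' ys') (gipKey (sx, sy))).Pairwise
        (fun a b => gipKey (sx, sy) a < gipKey (sx, sy) b) := by
      refine (hSle.and hSnodup).imp_of_mem ?_
      rintro a b ha hb ⟨hle, hne⟩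
      refine lt_of_le_of_ne hle (fun hkeq => hne ?_)
      obtain ⟨hax, hay, _, _, _⟩ := hmemS a ha
      obtain ⟨hbx, hby, _, _, _⟩ := hmemS b hb
      exact key_inj_quad sx sy xsgn ysgn hxsgn hysgn a b
        ((hxs _).mp hax).2.2 ((hys _).mp hay).2.2
        ((hxs _).mp hbx).2.2 ((hys _).mp hby).2.2 hkeq
    have hq : ∀ a b : Int × Int, gipKey (sx, sy) a ≤ gipKey (sx, sy) b →
        (fun p => decide ((ofLex (gipKey (sx, sy) p)).1 ≤ min r (W + H - 4))) b = true →
        (fun p => decide ((ofLex (gipKey (sx, sy) p)).1 ≤ min r (W + H - 4))) a = true := by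
      intro a b hle hb
      simp only [decide_eq_true_eq] at hb ⊢
      exact le_trans (lex_fst_le _ _ hle) hb
    obtain ⟨rest, hrest⟩ := filter_downclosed_prefix (gipKey (sx, sy))
      (fun p => decide ((ofLex (gipKey (sx, sy) p)).1 ≤ min r (W + H - 4))) hq
      (PySem.List.sorted (gipQuadFree ws xs' ys') (gipKey (sx, sy))) hSle
    have hfeq : (PySem.List.sorted (gipQuadFree ws xs' ys') (gipKey (sx, sy))).filter
        (fun p => decide ((ofLex (gipKey (sx, sy) p)).1 ≤ min r (W + H - 4)))
        = gipFlat walls W H sx sy xsgn ysgn ((min r (W + H - 4)).toNat + 1) 0 := by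
      refine eq_of_pairwise_lt_of_mem_iff (gipKey (sx, sy)) _ _ (hSlt.filter _)
        (pairwise_gipFlat walls W H sx sy xsgn ysgn _ hxsgn hysgn) ?_
      intro p
      rw [List.mem_filter, PySem.List.mem_sorted, mem_gipQuadFree,
        mem_gipFlat' walls W H sx sy xsgn ysgn xs ys hxsgn hysgn hxs hys _ p]
      constructor
      · rintro ⟨⟨hx', hy', hwn⟩, hqp⟩
        obtain ⟨hxx, hxr⟩ := (hxs' _).mp hx'
        obtain ⟨hyy, hyr⟩ := (hys' _).mp hy'
        have hkey := key_quad sx sy xsgn ysgn hxsgn hysgn p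
          ((hxs _).mp hxx).2.2 ((hys _).mp hyy).2.2
        rw [hkey] at hqp
        simp only [ofLex_toLex, decide_eq_true_eq] at hqp
        exact ⟨hxx, hyy, fun hw => hwn ((hws p).mpr hw), by push_cast; omega⟩
      · rintro ⟨hxx, hyy, hnw, hlt⟩
        have hx0 := ((hxs _).mp hxx).2.2
        have hy0 := ((hys _).mp hyy).2.2
        have hsum : xsgn * (p.1 - sx) + ysgn * (p.2 - sy) ≤ min r (W + H - 4) := by
          push_cast at hlt; omega
        have hkey := key_quad sx sy xsgn ysgn hxsgn hysgn p hx0 hy0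
        refine ⟨⟨(hxs' _).mpr ⟨hxx, by omega⟩, (hys' _).mpr ⟨hyy, by omega⟩,
          fun hw => hnw ((hws p).mp hw)⟩, ?_⟩
        rw [hkey]
        simp only [ofLex_toLex, decide_eq_true_eq]
        omega
    exact ⟨rest, by rw [← hfeq]; exact hrest⟩
  obtain ⟨rest, hrest⟩ := hbox
  obtain ⟨p0, p1, t, hP⟩ : ∃ p0 p1 t,
      gipFlat walls W H sx sy xsgn ysgn ((min r (W + H - 4)).toNat + 1) 0 = p0 :: p1 :: t := by
    rcases hfl : gipFlat walls W H sx sy xsgn ysgn ((min r (W + H - 4)).toNat + 1) 0 with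
      _ | ⟨p0, _ | ⟨p1, t⟩⟩
    · rw [hfl] at hcnt2; simp at hcnt2
    · rw [hfl] at hcnt2; simp at hcnt2
    · exact ⟨p0, p1, t, rfl⟩
  rw [hwhile, hP]
  rw [gipTwoNearest, hrest, hP]
  rfl

-- set(walls) has as many elements as walls.dedup
lemma setLen_eq_dedupLen (walls : List (Int × Int)) :
    (PySem.Set.ofList walls).length = walls.dedup.length :=
  ((List.perm_ext_iff_of_nodup (PySem.Set.nodup_ofList walls)
    (List.nodup_dedup walls)).mpr
    (fun p => (PySem.Set.mem_ofList walls p).trans List.mem_dedup.symm)).length_eq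

-- ===== VERDICT (by name: the statement is the Claim_ definition above) =====
theorem guess_initial_positions_spec : Claim_equal_guess_initial_positions := by
  intro walls _ hpre
  unfold Spec_guess_initial_positions
  simp only [Pre_guess_initial_positions] at hpre
  obtain ⟨hne, hcl, hcr⟩ := hpre
  simp only [guess_initial_positions, guess_initial_positions_alt]
  obtain ⟨hW, hH⟩ := two_le_of_count walls _ _ hcl
  have hr : ((walls.dedup.length : Nat) : Int) + 2
      ≤ ((PySem.Set.ofList walls).length : Int) + 2 := by
    rw [setLen_eq_dedupLen]
  have hrnn : (0 : Int) ≤ ((PySem.Set.ofList walls).length : Int) + 2 := by positivity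
  refine Prod.ext ?_ ?_
  · -- left corner
    exact gipCorner_eq walls (PySem.Set.ofList walls) _ _ 1
      (((PySem.List.max2? walls (fun p => p.1) (fun p => p.2)).getD (0, 0)).2 + 1 - 2) 1 (-1)
      (((PySem.Set.ofList walls).length : Int) + 2)
      (PySem.List.pyRange 1 (((PySem.List.max2? walls (fun p => p.1) (fun p => p.2)).getD (0, 0)).1 + 1))
      (PySem.List.pyRange 0 ((((PySem.List.max2? walls (fun p => p.1) (fun p => p.2)).getD (0, 0)).2 + 1) - 1))
      _ _
      hW hH (Or.inl rfl) (Or.inr rfl)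
      (PySem.Set.mem_ofList walls) hr
      (fun x => by rw [PySem.List.mem_pyRange_one]; omega)
      (fun y => by rw [PySem.List.mem_pyRange_one]; omega)
      (PySem.List.nodup_pyRange_one _ _) (PySem.List.nodup_pyRange_one _ _)
      (fun d xd h1 h2 h3 h4 => by unfold gipSafe; omega)
      (fun x y hx hy => by rw [PySem.List.mem_pyRange_one] at hx hy; omega)
      (fun t ht1 ht2 => by rw [PySem.List.mem_pyRange_one]; omega)
      (fun t ht1 ht2 => by rw [PySem.List.mem_pyRange_one]; omega)
      (fun x => by
        rw [PySem.List.mem_pyRange_one, PySem.List.mem_pyRange_one, lt_min_iff]; omega)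
      (fun y => by
        rw [PySem.List.mem_pyRange_one, PySem.List.mem_pyRange_one, max_le_iff]; omega)
      (PySem.List.nodup_pyRange_one _ _) (PySem.List.nodup_pyRange_one _ _)
      (quad_count walls 1 _ 0 _ hcl)
  · -- right corner
    exact gipCorner_eq walls (PySem.Set.ofList walls) _ _
      (((PySem.List.max2? walls (fun p => p.1) (fun p => p.2)).getD (0, 0)).1 + 1 - 2) 1 (-1) 1
      (((PySem.Set.ofList walls).length : Int) + 2)
      (PySem.List.pyRange 0 ((((PySem.List.max2? walls (fun p => p.1) (fun p => p.2)).getD (0, 0)).1 + 1) - 1))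
      (PySem.List.pyRange 1 (((PySem.List.max2? walls (fun p => p.1) (fun p => p.2)).getD (0, 0)).2 + 1))
      _ _
      hW hH (Or.inr rfl) (Or.inl rfl)
      (PySem.Set.mem_ofList walls) hr
      (fun x => by rw [PySem.List.mem_pyRange_one]; omega)
      (fun y => by rw [PySem.List.mem_pyRange_one]; omega)
      (PySem.List.nodup_pyRange_one _ _) (PySem.List.nodup_pyRange_one _ _)
      (fun d xd h1 h2 h3 h4 => by unfold gipSafe; omega)
      (fun x y hx hy => by rw [PySem.List.mem_pyRange_one] at hx hy; omega)
      (fun t ht1 ht2 => by rw [PySem.List.mem_pyRange_one]; omega)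
      (fun t ht1 ht2 => by rw [PySem.List.mem_pyRange_one]; omega)
      (fun x => by
        rw [PySem.List.mem_pyRange_one, PySem.List.mem_pyRange_one, max_le_iff]; omega)
      (fun y => by
        rw [PySem.List.mem_pyRange_one, PySem.List.mem_pyRange_one, lt_min_iff]; omega)
      (PySem.List.nodup_pyRange_one _ _) (PySem.List.nodup_pyRange_one _ _)
      (quad_count walls 0 _ 1 _ hcr)
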